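-- pv_equiv track=rewrite | github.com/und3rr00t/A-Maz-Ing | mazegen/gen_maze.py | get_path_coords
-- ===== SOURCE A (Python) =====
-- from typing import List, Tuple, Optional, Set
--
-- def get_path_coords(
--     start: Tuple[int, int], path_str: str
-- ) -> List[Tuple[int, int]]:
--     """
--     Translates a solution string into coordinate pairs.
--
--     Args:
--         start (Tuple[int, int]): Starting (x, y) coordinates.
--         path_str (str): The string of directional moves (N, S, E, W).
--
--     Returns:
--         List[Tuple[int, int]]: A list of (x, y) tuples
--         representing the path.
--     """
--     coords = [start]
--     x, y = start
--     for move in path_str: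
--         if move == 'N':
--             y -= 1
--         elif move == 'S':
--             y += 1
--         elif move == 'E':
--             x += 1
--         elif move == 'W':
--             x -= 1
--         coords.append((x, y))
--     return coords
-- ===== SOURCE B (Python) =====
-- def _prefix(a0, ds):
--     """Running sums: [a0, a0+ds[0], a0+ds[0]+ds[1], ...]."""
--     out = [a0]
--     for d in ds:
--         out.append(out[-1] + d)
--     return out
--
-- def get_path_coords(start, path_str):
--     D = {'N': (0, -1), 'S': (0, 1), 'E': (1, 0), 'W': (-1, 0)}
--     deltas = [D.get(m, (0, 0)) for m in path_str]
--     xs = _prefix(start[0], [d[0] for d in deltas])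
--     ys = _prefix(start[1], [d[1] for d in deltas])
--     return list(zip(xs, ys))
-- ===== Notes on version B (the rewrite author's own statement) =====
-- stated objective: alternative
-- what changed: Replaces the fused decode-and-step if/elif loop by a decode phase (a delta table mapped over the string, unknown moves giving (0,0)) followed by independent per-axis prefix-sum scans that are zipped into the coordinate list.
import Mathlib
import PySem

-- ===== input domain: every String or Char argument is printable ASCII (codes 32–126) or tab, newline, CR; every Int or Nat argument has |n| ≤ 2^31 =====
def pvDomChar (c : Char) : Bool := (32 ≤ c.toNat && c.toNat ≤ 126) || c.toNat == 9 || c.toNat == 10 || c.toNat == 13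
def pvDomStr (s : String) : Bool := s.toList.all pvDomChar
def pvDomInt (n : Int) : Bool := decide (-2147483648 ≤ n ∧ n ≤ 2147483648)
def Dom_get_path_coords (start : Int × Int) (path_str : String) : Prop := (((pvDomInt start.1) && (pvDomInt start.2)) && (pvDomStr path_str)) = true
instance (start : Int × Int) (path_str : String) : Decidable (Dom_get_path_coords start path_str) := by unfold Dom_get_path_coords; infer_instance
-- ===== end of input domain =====

-- B replaces A's fused if/elif step loop by a decode-to-deltas phase followed by
-- independent per-axis prefix-sum scans zipped together (alternative decomposition, same cost).


-- ===== PORT A =====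
-- one loop step: update (coords, x, y) from one move character (A's if/elif chain, in order)
def stepA (st : List (Int × Int) × Int × Int) (move : Char) : List (Int × Int) × Int × Int :=
  let x := st.2.1
  let y := st.2.2
  let p : Int × Int :=
    if move = 'N' then (x, y - 1)
    else if move = 'S' then (x, y + 1)
    else if move = 'E' then (x + 1, y)
    else if move = 'W' then (x - 1, y)
    else (x, y)
  (st.1 ++ [p], p.1, p.2)

def get_path_coords (start : Int × Int) (path_str : String) : List (Int × Int) :=
  (path_str.toList.foldl stepA ([start], start.1, start.2)).1

-- ===== PORT B =====
-- port of D.get(m, (0, 0)) on the literal 4-entry table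
def deltaB (move : Char) : Int × Int :=
  if move = 'N' then (0, -1)
  else if move = 'S' then (0, 1)
  else if move = 'E' then (1, 0)
  else if move = 'W' then (-1, 0)
  else (0, 0)

-- port of _prefix: running sums starting at a0
def prefixB (a0 : Int) : List Int → List Int
  | [] => [a0]
  | d :: ds => a0 :: prefixB (a0 + d) ds

def get_path_coords_alt (start : Int × Int) (path_str : String) : List (Int × Int) :=
  let deltas := path_str.toList.map deltaB
  List.zip (prefixB start.1 (deltas.map Prod.fst)) (prefixB start.2 (deltas.map Prod.snd))

-- ===== PRECONDITION & SPEC =====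
def Spec_get_path_coords (start : Int × Int) (path_str : String) (out : List (Int × Int)) : Prop := out = get_path_coords_alt start path_str
instance (start : Int × Int) (path_str : String) (out : List (Int × Int)) : Decidable (Spec_get_path_coords start path_str out) := by unfold Spec_get_path_coords; infer_instance

-- ===== CLAIM (what is proved, stated in full; the proofs are below) =====
def Claim_equal_get_path_coords : Prop := ∀ (start : Int × Int) (path_str : String), Dom_get_path_coords start path_str → Spec_get_path_coords start path_str (get_path_coords start path_str)

-- ===== LEMMAS AND PROOFS =====

-- A's one step moves (x, y) by exactly deltaB move
theorem stepA_delta (acc : List (Int × Int)) (x y : Int) (move : Char) :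
    stepA (acc, x, y) move =
      (acc ++ [(x + (deltaB move).1, y + (deltaB move).2)],
       x + (deltaB move).1, y + (deltaB move).2) := by
  simp only [stepA, deltaB]
  split_ifs <;> simp <;> omega

-- loop invariant: A's fold appends exactly B's zipped prefix sums (minus the seed pair)
theorem foldl_stepA (cs : List Char) : ∀ (acc : List (Int × Int)) (x y : Int),
    (List.foldl stepA (acc, x, y) cs).1 =
      acc ++ (List.zip (prefixB x ((cs.map deltaB).map Prod.fst))
                       (prefixB y ((cs.map deltaB).map Prod.snd))).tail := by
  induction cs with
  | nil => intro acc x y; simp [prefixB]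
  | cons c cs ih =>
      intro acc x y
      rw [List.foldl_cons, stepA_delta, ih]
      cases cs <;> simp [prefixB]

-- ===== VERDICT (by name: the statement is the Claim_ definition above) =====
theorem get_path_coords_spec : Claim_equal_get_path_coords := by
  intro start path_str _
  unfold Spec_get_path_coords get_path_coords get_path_coords_alt
  rw [foldl_stepA]
  cases path_str.toList with
  | nil => simp [prefixB]
  | cons c cs => simp [prefixB]
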